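-- pv_equiv track=rewrite | github.com/kasramalih/MIR_Project | Logic/core/LSH.py | shingle_document
-- ===== SOURCE A (Python) =====
-- def shingle_document(document, k=2):
--     """
--     Convert a document into a set of shingles.
--
--     Parameters
--     ----------
--     document : str
--         The input document.
--     k : int
--         The size of each shingle.
--
--     Returns
--     ----------
--     set
--         A set of shingles.
--     """
--     shingles = set()
--     words = document.split()
--     num_words = len(words)
--     for i in range(num_words - k + 1):
--         shingle = ' '.join(words[i:i+k])
--         shingles.add(shingle)
--     return shingles
-- ===== SOURCE B (Python) =====
-- def shingle_document(document, k=2):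
--     """Shingles via the transpose idiom: zip k shifted word lists into k-tuples."""
--     words = document.split()
--     if k > len(words):
--         return set()
--     return {' '.join(t) for t in zip(*(words[i:] for i in range(k)))}
-- ===== Notes on version B (the rewrite author's own statement) =====
-- stated objective: idiomatic
-- what changed: Replaces the window-start index loop with slicing by the zip/transpose idiom: build k shifted word lists (with an early empty-set return when k exceeds the word count) and zip them into consecutive k-tuples, joining each into a shingle.
-- outside the precondition, e.g. on shingle_document('a b c', 0): A returns {''}, B returns set(); on shingle_document('a b c d', -2): A returns {'', 'b c', 'a b'}, B returns set()
import Mathlib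
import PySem

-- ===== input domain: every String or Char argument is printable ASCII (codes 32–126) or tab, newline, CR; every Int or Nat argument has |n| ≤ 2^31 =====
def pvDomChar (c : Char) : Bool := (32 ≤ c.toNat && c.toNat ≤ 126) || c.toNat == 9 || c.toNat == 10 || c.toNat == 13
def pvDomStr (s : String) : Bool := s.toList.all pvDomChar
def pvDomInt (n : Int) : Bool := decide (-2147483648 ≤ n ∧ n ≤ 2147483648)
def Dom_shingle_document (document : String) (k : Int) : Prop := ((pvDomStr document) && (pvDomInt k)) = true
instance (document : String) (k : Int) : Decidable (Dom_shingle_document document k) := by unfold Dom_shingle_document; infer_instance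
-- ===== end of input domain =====

-- B replaces the window-start index loop with the zip/transpose idiom over k shifted
-- word lists (a different decomposition of the same task, not claimed faster).

-- ===== PORT A =====
-- for i in range(num_words - k + 1): shingles.add(' '.join(words[i:i+k]))
def shingle_document (document : String) (k : Int) : List String :=
  let words := PySem.Str.split₀ document
  let num_words : Int := words.length
  (PySem.List.pyRange 0 (num_words - k + 1) 1).foldl
    (fun shingles i =>
      PySem.Set.add shingles (PySem.Str.join " " (PySem.List.slice words (some i) (some (i + k)))))
    PySem.Set.empty

-- ===== PORT B =====
-- hand port of Python's variadic zip(*lists): take heads while every list is nonempty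
-- (structural recursion on the first list; each step pops one element off every list)
def pyZipNAux {α : Type} [Inhabited α] (l : List α) (rest : List (List α)) : List (List α) :=
  match l with
  | [] => []
  | a :: l' =>
    if rest.all (fun x => !x.isEmpty) then
      (a :: rest.map (fun x => x.headI)) :: pyZipNAux l' (rest.map (fun x => x.tail))
    else []

def pyZipN {α : Type} [Inhabited α] (ls : List (List α)) : List (List α) :=
  match ls with
  | [] => []
  | l :: rest => pyZipNAux l rest

def shingle_document_alt (document : String) (k : Int) : List String :=
  let words := PySem.Str.split₀ document
  if k > (words.length : Int) then PySem.Set.empty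
  else
    let cols := (PySem.List.pyRange 0 k 1).map (fun i => PySem.List.slice words (some i) none)
    PySem.Set.ofList ((pyZipN cols).map (fun t => PySem.Str.join " " t))

-- ===== PRECONDITION & SPEC =====
-- Pre_ excludes non-positive shingle sizes k <= 0, a degenerate parameter no caller would
-- specify and for which no value is the specified one: A returns the set of joins of the
-- wrapped-around slices (always containing the empty string), B returns the empty set,
-- and either reading of this degenerate case is as defensible as the other.
def Pre_shingle_document (document : String) (k : Int) : Prop := 1 ≤ k
instance (document : String) (k : Int) : Decidable (Pre_shingle_document document k) := by
  unfold Pre_shingle_document; infer_instance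

def pvWitness_shingle_document : String × Int := ("a b c", 2)

def Spec_shingle_document (document : String) (k : Int) (out : List String) : Prop :=
  out = shingle_document_alt document k
instance (document : String) (k : Int) (out : List String) : Decidable (Spec_shingle_document document k out) := by
  unfold Spec_shingle_document; infer_instance

-- ===== CLAIM (what is proved, stated in full; the proofs are below) =====
def Claim_equal_shingle_document : Prop := ∀ (document : String) (k : Int), Dom_shingle_document document k → Pre_shingle_document document k → Spec_shingle_document document k (shingle_document document k)

-- ===== LEMMAS AND PROOFS =====

theorem headI_map_range_drop {α : Type} [Inhabited α] (kk : Nat) (t : List α) (hk : kk ≤ t.length) :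
    (List.range kk).map (fun j => (t.drop j).headI) = t.take kk := by
  apply List.ext_getElem
  · simp; omega
  · intro i h1 h2
    simp only [List.getElem_map, List.getElem_range, List.getElem_take]
    have hi : i < t.length := by simp at h1; omega
    rw [List.drop_eq_getElem_cons hi]
    rfl

theorem pyZipNAux_drops {α : Type} [Inhabited α] (kk : Nat) (ws : List α) :
    pyZipNAux ws ((List.range kk).map (fun j => ws.drop (j + 1))) =
      (List.range (ws.length - kk)).map (fun i => ((ws.drop i).take (kk + 1))) := by
  induction ws with
  | nil => simp [pyZipNAux]
  | cons a t ih =>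
    simp only [List.drop_succ_cons]
    rw [pyZipNAux]
    by_cases hk : kk ≤ t.length
    · have hall : ((List.range kk).map (fun j => t.drop j)).all (fun x => !x.isEmpty) = true := by
        simp only [List.all_eq_true, List.mem_map, List.mem_range]
        rintro x ⟨j, hj, rfl⟩
        simp [List.drop_eq_nil_iff]
        omega
      rw [if_pos hall]
      have hheads : ((List.range kk).map (fun j => t.drop j)).map (fun x => x.headI)
          = t.take kk := by
        rw [List.map_map]; exact headI_map_range_drop kk t hk
      have htails : ((List.range kk).map (fun j => t.drop j)).map (fun x => x.tail)
          = (List.range kk).map (fun j => t.drop (j + 1)) := by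
        rw [List.map_map]
        apply List.map_congr_left
        intro j _
        simp [List.tail_drop]
      rw [hheads, htails, ih]
      have hlen : (a :: t).length - kk = (t.length - kk) + 1 := by simp; omega
      rw [hlen, List.range_succ_eq_map]
      simp [List.map_map, Function.comp]
    · have hall : ((List.range kk).map (fun j => t.drop j)).all (fun x => !x.isEmpty) = false := by
        simp only [List.all_eq_false, List.mem_map, List.mem_range]
        exact ⟨t.drop t.length, ⟨t.length, by omega, rfl⟩, by simp⟩
      rw [if_neg (by simp [hall])]
      have : (a :: t).length - kk = 0 := by simp; omega
      rw [this]
      simp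

-- zip of the kk shifted tails of ws enumerates exactly the kk-windows of ws
theorem pyZipN_drops {α : Type} [Inhabited α] (kk : Nat) (hk : 1 ≤ kk) (ws : List α) :
    pyZipN ((List.range kk).map (fun j => ws.drop j)) =
      (List.range (ws.length + 1 - kk)).map (fun i => ((ws.drop i).take kk)) := by
  obtain ⟨m, rfl⟩ : ∃ m, kk = m + 1 := ⟨kk - 1, by omega⟩
  rw [List.range_succ_eq_map]
  simp only [List.map_cons, List.map_map, List.drop_zero]
  rw [pyZipN]
  have : (List.range m).map ((fun j => ws.drop j) ∘ Nat.succ)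
      = (List.range m).map (fun j => ws.drop (j + 1)) := by
    apply List.map_congr_left; intro j _; rfl
  rw [this, pyZipNAux_drops]
  have : ws.length + 1 - (m + 1) = ws.length - m := by omega
  rw [this]

-- ===== VERDICT (by name: the statement is the Claim_ definition above) =====
theorem shingle_document_spec : Claim_equal_shingle_document := by
  intro document k _ hk
  unfold Pre_shingle_document at hk
  unfold Spec_shingle_document
  obtain ⟨kk, rfl⟩ : ∃ kk : Nat, k = (kk : Int) := ⟨k.toNat, by omega⟩
  have hkk : 1 ≤ kk := by exact_mod_cast hk
  unfold shingle_document shingle_document_alt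
  set ws := PySem.Str.split₀ document with hws
  by_cases hbig : (kk : Int) > (ws.length : Int)
  · -- k exceeds the word count: A's range is empty, B's guard returns the empty set
    rw [if_pos hbig]
    show List.foldl _ _ (PySem.List.pyRange 0 ((ws.length : Int) - kk + 1) 1) = _
    rw [PySem.List.pyRange_one_eq_nil (by omega)]
    rfl
  rw [if_neg hbig]
  -- A's loop is set(map): foldl add ∅ = ofList ∘ map
  rw [show (PySem.Set.empty : PySem.Set String) = PySem.Set.update [] [] from rfl]
  rw [← PySem.Set.update_map_eq_foldl_add, PySem.Set.update_nil_left]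
  -- reduce both index lists to List.range over Nat
  congr 1
  rw [PySem.List.pyRange_one 0 ((ws.length : Int) - kk + 1), PySem.List.pyRange_one 0 kk]
  have h1 : (((ws.length : Int) - kk + 1) - 0).toNat = ws.length + 1 - kk := by omega
  have h2 : ((kk : Int) - 0).toNat = kk := by omega
  rw [h1, h2]
  simp only [List.map_map]
  have hcols : (List.range kk).map ((fun i => PySem.List.slice ws (some i) none) ∘ (fun j : Nat => (0 : Int) + j))
      = (List.range kk).map (fun j => ws.drop j) := by
    apply List.map_congr_left
    intro j _
    simp only [Function.comp, zero_add]
    exact PySem.List.slice_from_natCast ws j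
  rw [hcols, pyZipN_drops kk hkk ws, List.map_map]
  apply List.map_congr_left
  intro i _
  simp only [Function.comp, zero_add]
  congr 1
  have : (i : Int) + (kk : Int) = ((i + kk : Nat) : Int) := by push_cast; ring
  rw [this, PySem.List.slice_natCast]
  congr 1
  omega
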